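-- pv_equiv track=rewrite | github.com/Carlanga213/Estrategias_Algoritmicas | Notas_Libreria/codigos_ejercicios/E07_analisis_selection_sort.py | selection_cmp_mov
-- ===== SOURCE A (Python) =====
-- def selection_cmp_mov(arr):
--     cmp = 0
--     mov = 0
--     n = len(arr)
--     for p in range(n-1):
--         mn = p
--         for i in range(p+1, n):
--             cmp += 1
--             if arr[i] < arr[mn]:
--                 mn = i
--         if p != mn:
--             arr[p], arr[mn] = arr[mn], arr[p]
--             mov += 3
--     return cmp, mov
-- ===== SOURCE B (Python) =====
-- def selection_cmp_mov(arr):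
--     # Return value only: A also sorts arr in place; B leaves arr untouched.
--     # Comparisons are always n*(n-1)//2; moves are 3 per pass whose first
--     # minimum is not already at the front: repeatedly bring the first minimum
--     # of a working copy to the front and continue on the tail, counting swaps.
--     n = len(arr)
--     xs = list(arr)
--     cnt = 0
--     while len(xs) >= 2:
--         i = xs.index(min(xs))
--         if i == 0:
--             xs = xs[1:]
--         else:
--             rest = xs[1:]
--             rest[i - 1] = xs[0]
--             xs = rest
--             cnt += 1
--     return n * (n - 1) // 2, 3 * cnt
-- ===== Notes on version B (the rewrite author's own statement) =====
-- stated objective: alternative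
-- what changed: Replaces the indexed double loop over a mutated array by a closed-form comparison count n*(n-1)//2 plus a single loop of list surgery on a working copy: bring the first minimum to the front, continue on the tail, counting swaps.
import Mathlib
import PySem

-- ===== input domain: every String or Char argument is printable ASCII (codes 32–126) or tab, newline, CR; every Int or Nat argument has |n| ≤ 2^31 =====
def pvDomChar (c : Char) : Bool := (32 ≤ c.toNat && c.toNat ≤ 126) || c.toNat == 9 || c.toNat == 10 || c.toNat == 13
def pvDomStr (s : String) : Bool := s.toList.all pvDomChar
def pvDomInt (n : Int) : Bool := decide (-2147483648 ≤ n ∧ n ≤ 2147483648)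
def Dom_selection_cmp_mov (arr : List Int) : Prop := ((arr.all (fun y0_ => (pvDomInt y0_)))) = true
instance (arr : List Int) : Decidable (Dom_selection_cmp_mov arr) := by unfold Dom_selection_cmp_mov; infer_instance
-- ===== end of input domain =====

-- B replaces A's indexed double loop by the closed-form comparison count n*(n-1)//2 plus a
-- structural recursion on a pure list (bring the first minimum to the front, recurse on the
-- tail) that counts swaps (objective: alternative; return value only — A sorts arr in place,
-- B leaves arr untouched).


-- ===== PORT A =====
-- inner 'for i in range(p+1, n)' body: cmp += 1; if arr[i] < arr[mn]: mn = i
def selAInnerStep (a : List Int) (s : Int × Int) (i : Int) : Int × Int :=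
  if PySem.List.pyGetD a i 0 < PySem.List.pyGetD a s.2 0 then (s.1 + 1, i) else (s.1 + 1, s.2)

-- outer 'for p in range(n-1)' body over state (cmp, mov, arr)
def selAStep (n : Int) (st : Int × Int × List Int) (p : Int) : Int × Int × List Int :=
  let inner := (PySem.List.pyRange (p + 1) n 1).foldl (selAInnerStep st.2.2) (st.1, p)
  if p ≠ inner.2 then
    (inner.1, st.2.1 + 3,
      PySem.List.pySetD (PySem.List.pySetD st.2.2 p (PySem.List.pyGetD st.2.2 inner.2 0)) inner.2
        (PySem.List.pyGetD st.2.2 p 0))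
  else (inner.1, st.2.1, st.2.2)

def selection_cmp_mov (arr : List Int) : Int × Int :=
  let n : Int := (arr.length : Int)
  let st := (PySem.List.pyRange 0 (n - 1) 1).foldl (selAStep n) (0, 0, arr)
  (st.1, st.2.1)

-- ===== PORT B =====
-- Source B's while loop over state (xs, cnt): xs[1:] is the exact drop 1 (nonnegative slice);
-- 'rest[i - 1] = xs[0]' is List.set (i ≥ 1 and i < len(xs), so i-1 is in range and
-- Python's list assignment never wraps or raises here); xs[0] is headD (xs nonempty).
def selSwapsLoop (xs : List Int) (cnt : Int) : Int :=
  if h : xs.length < 2 then cnt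
  else
    let i := (PySem.List.index? xs ((PySem.List.min? xs (fun x => x)).getD 0)).getD 0
    if i = 0 then selSwapsLoop (xs.drop 1) cnt
    else selSwapsLoop ((xs.drop 1).set (i - 1) (xs.headD 0)) (cnt + 1)
termination_by xs.length
decreasing_by
  · simp only [List.length_drop]; omega
  · simp only [List.length_set, List.length_drop]; omega

def selection_cmp_mov_alt (arr : List Int) : Int × Int :=
  let n : Int := (arr.length : Int)
  (PySem.Int.floordiv (n * (n - 1)) 2, 3 * selSwapsLoop arr 0)

-- ===== PRECONDITION & SPEC =====
def Spec_selection_cmp_mov (arr : List Int) (out : Int × Int) : Prop := out = selection_cmp_mov_alt arr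
instance (arr : List Int) (out : Int × Int) : Decidable (Spec_selection_cmp_mov arr out) := by unfold Spec_selection_cmp_mov; infer_instance

-- ===== CLAIM (what is proved, stated in full; the proofs are below) =====
def Claim_equal_selection_cmp_mov : Prop := ∀ (arr : List Int), Dom_selection_cmp_mov arr → Spec_selection_cmp_mov arr (selection_cmp_mov arr)

-- ===== LEMMAS AND PROOFS =====

-- proof-side accumulator-free form of B's while loop
def selSwaps (xs : List Int) : Int :=
  if h : xs.length < 2 then 0
  else
    let i := (PySem.List.index? xs ((PySem.List.min? xs (fun x => x)).getD 0)).getD 0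
    if i = 0 then selSwaps (xs.drop 1)
    else 1 + selSwaps ((xs.drop 1).set (i - 1) (xs.headD 0))
termination_by xs.length
decreasing_by
  · simp only [List.length_drop]; omega
  · simp only [List.length_set, List.length_drop]; omega

theorem selSwapsLoop_eq_aux (n : Nat) : ∀ (xs : List Int), xs.length ≤ n → ∀ (cnt : Int),
    selSwapsLoop xs cnt = cnt + selSwaps xs := by
  induction n with
  | zero =>
    intro xs hlen cnt
    rw [selSwapsLoop, selSwaps]
    simp only [dif_pos (by omega : xs.length < 2)]
    ring
  | succ n ih =>
    intro xs hlen cnt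
    rw [selSwapsLoop, selSwaps]
    by_cases h : xs.length < 2
    · simp only [dif_pos h]
      ring
    · simp only [dif_neg h]
      by_cases hi : ((PySem.List.index? xs ((PySem.List.min? xs (fun x => x)).getD 0)).getD 0) = 0
      · simp only [hi, if_true]
        rw [ih (xs.drop 1) (by simp only [List.length_drop]; omega) cnt]
      · rw [if_neg hi, if_neg hi,
          ih ((xs.drop 1).set (((PySem.List.index? xs ((PySem.List.min? xs (fun x => x)).getD 0)).getD 0) - 1) (xs.headD 0))
            (by simp only [List.length_set, List.length_drop]; omega) (cnt + 1)]
        ring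

theorem selSwapsLoop_eq (xs : List Int) (cnt : Int) : selSwapsLoop xs cnt = cnt + selSwaps xs :=
  selSwapsLoop_eq_aux xs.length xs le_rfl cnt

-- invariant of A's inner scan: after scanning indices [p, lo), mn is the first argmin so far
def FA (a : List Int) (p lo mn : Nat) : Prop :=
  p ≤ mn ∧ mn < lo ∧ (∀ j, p ≤ j → j < lo → a.getD mn 0 ≤ a.getD j 0) ∧
    (∀ j, p ≤ j → j < mn → a.getD mn 0 < a.getD j 0)

-- the index B's recursion picks at the front of a.drop p, shifted to an absolute index
def bmn (a : List Int) (p : Nat) : Nat :=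
  p + ((PySem.List.index? (a.drop p) ((PySem.List.min? (a.drop p) (fun x => x)).getD 0)).getD 0)

theorem FA_unique (a : List Int) (p lo m1 m2 : Nat) (h1 : FA a p lo m1) (h2 : FA a p lo m2) :
    m1 = m2 := by
  obtain ⟨hp1, hlt1, hle1, hstr1⟩ := h1
  obtain ⟨hp2, hlt2, hle2, hstr2⟩ := h2
  rcases Nat.lt_trichotomy m1 m2 with h | h | h
  · exact absurd (hle1 m2 hp2 hlt2) (not_le_of_gt (hstr2 m1 hp1 h))
  · exact h
  · exact absurd (hle2 m1 hp1 hlt1) (not_le_of_gt (hstr1 m2 hp2 h))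

theorem scanA (a : List Int) (p : Nat) : ∀ (k lo : Nat) (cmp : Int) (mn : Nat),
    lo + k = a.length → FA a p lo mn →
    ∃ r : Nat, (PySem.List.pyRange (lo : Int) ((a.length : Int)) 1).foldl (selAInnerStep a)
        (cmp, (mn : Int)) = (cmp + (k : Int), (r : Int)) ∧ FA a p a.length r := by
  intro k
  induction k with
  | zero =>
    intro lo cmp mn hlen hfa
    have hlo : lo = a.length := by omega
    subst hlo
    rw [PySem.List.pyRange_one_eq_nil le_rfl]
    exact ⟨mn, by simp, hfa⟩
  | succ k ih =>
    intro lo cmp mn hlen hfa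
    have hlt : (lo : Int) < (a.length : Int) := by omega
    rw [PySem.List.pyRange_one_cons hlt, List.foldl_cons]
    have hcast : (lo : Int) + 1 = ((lo + 1 : Nat) : Int) := by push_cast; ring
    rw [hcast]
    simp only [selAInnerStep, PySem.List.pyGetD_natCast]
    obtain ⟨hp1, hlt1, hle1, hstr1⟩ := hfa
    by_cases h : a.getD lo 0 < a.getD mn 0
    · rw [if_pos h]
      have hfa' : FA a p (lo + 1) lo := by
        refine ⟨by omega, by omega, ?_, ?_⟩
        · intro j h1 h2
          rcases Nat.lt_or_ge j lo with hj | hj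
          · exact le_of_lt (lt_of_lt_of_le h (hle1 j h1 hj))
          · have : j = lo := by omega
            rw [this]
        · intro j h1 h2
          exact lt_of_lt_of_le h (hle1 j h1 h2)
      obtain ⟨r, hr, hfar⟩ := ih (lo + 1) (cmp + 1) lo (by omega) hfa'
      refine ⟨r, ?_, hfar⟩
      rw [hr]
      refine Prod.ext ?_ rfl
      push_cast
      ring
    · rw [if_neg h]
      have hfa' : FA a p (lo + 1) mn := by
        refine ⟨hp1, by omega, ?_, hstr1⟩
        intro j h1 h2
        rcases Nat.lt_or_ge j lo with hj | hj
        · exact hle1 j h1 hj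
        · have : j = lo := by omega
          rw [this]
          exact le_of_not_gt h
      obtain ⟨r, hr, hfar⟩ := ih (lo + 1) (cmp + 1) mn (by omega) hfa'
      refine ⟨r, ?_, hfar⟩
      rw [hr]
      refine Prod.ext ?_ rfl
      push_cast
      ring

theorem bmn_FA (a : List Int) (p : Nat) (hp : p + 1 ≤ a.length) : FA a p a.length (bmn a p) := by
  have htlen : (a.drop p).length = a.length - p := List.length_drop
  have htne : a.drop p ≠ [] := List.ne_nil_of_length_pos (by omega)
  cases hmin : PySem.List.min? (a.drop p) (fun x => x) with
  | none => exact absurd ((PySem.List.min?_eq_none_iff _ _).mp hmin) htne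
  | some m =>
    have hmem : m ∈ a.drop p := PySem.List.min?_mem hmin
    have hlb : ∀ y ∈ a.drop p, m ≤ y := PySem.List.min?_isMin hmin
    cases hidx : PySem.List.index? (a.drop p) m with
    | none => exact absurd hmem ((PySem.List.index?_eq_none_iff _ _).mp hidx)
    | some k =>
      obtain ⟨hkl, hk, hfirst⟩ := PySem.List.getElem_of_index?_eq_some hidx
      have hbmn : bmn a p = p + k := by
        rw [PySem.List.index?_eq_idxOf?] at hidx
        simp [bmn, hmin, hidx]
      rw [hbmn]
      have hklen : p + k < a.length := by omega
      have hgd : ∀ j (_ : p ≤ j) (hj : j < a.length),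
          a.getD j 0 = (a.drop p)[j - p]'(by omega) := by
        intro j hpj hj
        rw [List.getD_eq_getElem a 0 hj, List.getElem_drop]
        congr 1
        omega
      have hval : a.getD (p + k) 0 = m := by
        rw [hgd (p + k) (by omega) hklen]
        have : p + k - p = k := by omega
        simp only [this]
        exact hk
      refine ⟨Nat.le_add_right _ _, hklen, ?_, ?_⟩
      · intro j h1 h2
        rw [hval, hgd j h1 h2]
        exact hlb _ (List.getElem_mem _)
      · intro j h1 h2
        have hne : (a.drop p)[j - p]'(by omega) ≠ m := hfirst (j - p) (by omega)
        rw [hval, hgd j h1 (by omega)]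
        exact lt_of_le_of_ne (hlb _ (List.getElem_mem _)) (Ne.symm hne)

theorem selSwaps_short (xs : List Int) (h : xs.length < 2) : selSwaps xs = 0 := by
  rw [selSwaps]
  simp [h]

theorem step_eq (a : List Int) (lo : Nat) (hlo : lo + 1 < a.length) (cmp mov : Int) :
    ∃ a' : List Int, a'.length = a.length ∧ ∃ s : Int,
      selAStep ((a.length : Int)) (cmp, mov, a) ((lo : Int))
        = (cmp + ((a.length - (lo + 1) : Nat) : Int), mov + 3 * s, a') ∧
      selSwaps (a.drop lo) = s + selSwaps (a'.drop (lo + 1)) := by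
  have hfa0 : FA a lo (lo + 1) lo := by
    refine ⟨le_rfl, by omega, ?_, by omega⟩
    intro j h1 h2
    have : j = lo := by omega
    rw [this]
  obtain ⟨r, hr, hfar⟩ := scanA a lo (a.length - (lo + 1)) (lo + 1) cmp lo (by omega) hfa0
  have hrb : r = bmn a lo := FA_unique a lo a.length r (bmn a lo) hfar (bmn_FA a lo (by omega))
  subst hrb
  have hcast : ((lo + 1 : Nat) : Int) = (lo : Int) + 1 := by push_cast; ring
  rw [hcast] at hr
  have hb := bmn_FA a lo (by omega)
  obtain ⟨hble, hblt, -, -⟩ := hb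
  -- the index B picks, as a Nat
  set i := ((PySem.List.index? (a.drop lo) ((PySem.List.min? (a.drop lo) (fun x => x)).getD 0)).getD 0) with hi
  have hbmn_def : bmn a lo = lo + i := rfl
  have hxs_len : (a.drop lo).length = a.length - lo := List.length_drop
  have hxs_ge : ¬ (a.drop lo).length < 2 := by omega
  have hdrop1 : (a.drop lo).drop 1 = a.drop (lo + 1) := by
    rw [List.drop_drop]
  have hswap_unfold : selSwaps (a.drop lo) =
      if i = 0 then selSwaps (a.drop (lo + 1))
      else 1 + selSwaps (((a.drop lo).drop 1).set (i - 1) ((a.drop lo).headD 0)) := by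
    rw [selSwaps]
    simp only [hxs_ge, dite_false, ← hi, hdrop1]
  by_cases hcase : bmn a lo = lo
  · have hi0 : i = 0 := by omega
    refine ⟨a, rfl, 0, ?_, ?_⟩
    · simp only [selAStep]
      rw [hr, hcase]
      norm_num
    · rw [hswap_unfold, if_pos hi0]
      ring
  · have hi1 : 1 ≤ i := by omega
    refine ⟨(a.set lo (a.getD (bmn a lo) 0)).set (bmn a lo) (a.getD lo 0), ?_, 1, ?_, ?_⟩
    · simp
    · simp only [selAStep]
      rw [hr]
      have hne : ((lo : Int) ≠ ((bmn a lo : Nat) : Int)) := by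
        intro hcontra
        exact hcase (by exact_mod_cast hcontra.symm)
      rw [if_pos hne]
      simp only [PySem.List.pySetD_natCast, PySem.List.pyGetD_natCast]
      norm_num
    · rw [hswap_unfold, if_neg (by omega)]
      have h1 : bmn a lo - (lo + 1) = i - 1 := by omega
      have h2 : (List.drop lo a).headD 0 = a.getD lo 0 := by
        rw [List.headD_eq_head?, List.head?_drop, List.getD_eq_getElem a 0 (by omega),
          List.getElem?_eq_getElem (by omega)]
        rfl
      rw [List.drop_set, if_neg (by omega), List.drop_set_of_lt (by omega), hdrop1, h1, h2]

def triSum : Nat → Int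
  | 0 => 0
  | k + 1 => triSum k + ((k : Int) + 1)

theorem triSum_two_mul (k : Nat) : 2 * triSum k = (k : Int) * ((k : Int) + 1) := by
  induction k with
  | zero => simp [triSum]
  | succ k ih =>
    rw [triSum, mul_add, ih]
    push_cast
    ring

theorem outer (n0 : Nat) : ∀ (k lo : Nat) (a : List Int) (cmp mov : Int),
    a.length = n0 → lo + k + 1 = n0 →
    ∃ a' : List Int,
      (PySem.List.pyRange (lo : Int) ((n0 : Int) - 1) 1).foldl (selAStep ((n0 : Int))) (cmp, mov, a)
        = (cmp + triSum k, mov + 3 * selSwaps (a.drop lo), a') := by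
  intro k
  induction k with
  | zero =>
    intro lo a cmp mov hlen hk
    rw [PySem.List.pyRange_one_eq_nil (by omega)]
    refine ⟨a, ?_⟩
    rw [selSwaps_short _ (by rw [List.length_drop]; omega)]
    simp [triSum]
  | succ k ih =>
    intro lo a cmp mov hlen hk
    subst hlen
    rw [PySem.List.pyRange_one_cons (by omega)]
    simp only [List.foldl_cons]
    obtain ⟨a', hlen', s, hA, hS⟩ := step_eq a lo (by omega) cmp mov
    rw [hA]
    have hcast : (lo : Int) + 1 = ((lo + 1 : Nat) : Int) := by push_cast; ring
    rw [hcast]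
    obtain ⟨a'', hrec⟩ :=
      ih (lo + 1) a' (cmp + ((a.length - (lo + 1) : Nat) : Int)) (mov + 3 * s) hlen' (by omega)
    rw [hrec]
    refine ⟨a'', Prod.ext ?_ (Prod.ext ?_ rfl)⟩
    · have hsub : (a.length - (lo + 1) : Nat) = k + 1 := by omega
      simp only [hsub, triSum]
      push_cast
      ring
    · simp only [hS]
      ring

-- ===== VERDICT (by name: the statement is the Claim_ definition above) =====
theorem selection_cmp_mov_spec : Claim_equal_selection_cmp_mov := by
  intro arr _
  unfold Spec_selection_cmp_mov
  cases harr : arr.length with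
  | zero =>
    have hnil : arr = [] := List.eq_nil_of_length_eq_zero harr
    subst hnil
    simp only [selection_cmp_mov, selection_cmp_mov_alt]
    rw [selSwapsLoop_eq, selSwaps_short _ (by simp)]
    rw [PySem.List.pyRange_one_eq_nil (by simp)]
    simp [PySem.Int.floordiv]
  | succ m =>
    simp only [selection_cmp_mov, selection_cmp_mov_alt]
    obtain ⟨a', H⟩ := outer arr.length m 0 arr 0 0 rfl (by omega)
    rw [Nat.cast_zero] at H
    rw [H]
    refine Prod.ext ?_ ?_
    · simp only []
      rw [harr]
      have h2 : 2 * triSum m = (m : Int) * ((m : Int) + 1) := triSum_two_mul m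
      have harg : ((m + 1 : Nat) : Int) * (((m + 1 : Nat) : Int) - 1) = 2 * triSum m := by
        rw [h2]
        push_cast
        ring
      rw [harg, PySem.Int.floordiv_eq_ediv_of_pos (by norm_num)]
      rw [Int.mul_ediv_cancel_left _ (by norm_num)]
      ring
    · simp [selSwapsLoop_eq]
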